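-- pv_equiv track=rewrite | github.com/juanary/Trabajos-AED | 025_TP2_G085_Araya_408756.py | detectar_moneda
-- ===== SOURCE A (Python) =====
-- MONEDAS_VALIDAS = ["ARS", "USD", "EUR", "GBP", "JPN"]
--
-- def detectar_moneda(cadena):
--     encontrada = [m for m in MONEDAS_VALIDAS if cadena.count(m) >= 1]
--     if len(encontrada) == 1:
--         return encontrada[0]
--     elif len(encontrada) == 0:
--         return "INVALIDA"
--     else:
--         return "MULTIPLE"
-- ===== SOURCE B (Python) =====
-- VALID_SET = {"ARS", "USD", "EUR", "GBP", "JPN"}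
--
-- def detectar_moneda(cadena):
--     found = set()
--     for i in range(len(cadena) - 2):
--         sub = cadena[i:i + 3]
--         if sub in VALID_SET:
--             found.add(sub)
--     if len(found) == 1:
--         return next(iter(found))
--     elif len(found) == 0:
--         return "INVALIDA"
--     else:
--         return "MULTIPLE"
-- ===== Notes on version B (the rewrite author's own statement) =====
-- stated objective: alternative
-- what changed: Instead of calling str.count for each of the 5 currency codes, B slides a 3-character window over the input once, collecting matches against a set of valid codes, then branches on the number of distinct codes found.
import Mathlib
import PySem

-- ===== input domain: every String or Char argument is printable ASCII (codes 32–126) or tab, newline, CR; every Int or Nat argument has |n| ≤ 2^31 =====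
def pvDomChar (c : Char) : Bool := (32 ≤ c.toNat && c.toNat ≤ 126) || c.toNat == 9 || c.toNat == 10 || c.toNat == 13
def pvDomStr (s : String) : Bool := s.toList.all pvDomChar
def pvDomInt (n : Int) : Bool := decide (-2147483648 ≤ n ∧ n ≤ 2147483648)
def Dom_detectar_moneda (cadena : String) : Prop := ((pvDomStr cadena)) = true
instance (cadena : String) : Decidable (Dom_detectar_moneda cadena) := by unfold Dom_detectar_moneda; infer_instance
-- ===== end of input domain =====

-- B replaces per-code str.count scans with one sliding 3-char window pass collecting hits in a set (alternative decomposition, same results).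


-- ===== PORT A =====
def MONEDAS_VALIDAS : List String := ["ARS", "USD", "EUR", "GBP", "JPN"]

def detectar_moneda (cadena : String) : String :=
  let encontrada := MONEDAS_VALIDAS.filter (fun m => decide (1 ≤ PySem.Str.count cadena m))
  if encontrada.length = 1 then PySem.List.pyGetD encontrada 0 ""
  else if encontrada.length = 0 then "INVALIDA"
  else "MULTIPLE"

-- ===== PORT B =====
def VALID_SET : PySem.Set String := PySem.Set.ofList ["ARS", "USD", "EUR", "GBP", "JPN"]

def detectar_moneda_alt (cadena : String) : String :=
  let found : PySem.Set String :=
    (PySem.List.pyRange 0 (PySem.Str.len cadena - 2) 1).foldl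
      (fun fs i =>
        let sub := PySem.Str.slice cadena (some i) (some (i + 3))
        if VALID_SET.contains sub then PySem.Set.add fs sub else fs)
      PySem.Set.empty
  if PySem.Set.len found = 1 then found.headD ""  -- next(iter(found)) on a one-element set
  else if PySem.Set.len found = 0 then "INVALIDA"
  else "MULTIPLE"

-- ===== PRECONDITION & SPEC =====
def Spec_detectar_moneda (cadena : String) (out : String) : Prop := out = detectar_moneda_alt cadena
instance (cadena : String) (out : String) : Decidable (Spec_detectar_moneda cadena out) := by unfold Spec_detectar_moneda; infer_instance

-- ===== CLAIM (what is proved, stated in full; the proofs are below) =====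
def Claim_equal_detectar_moneda : Prop := ∀ (cadena : String), Dom_detectar_moneda cadena → Spec_detectar_moneda cadena (detectar_moneda cadena)

-- ===== LEMMAS AND PROOFS =====

-- count.go never decreases the accumulator
theorem countGo_le (sub : List Char) : ∀ (fuel : Nat) (l : List Char) (acc : Nat),
    acc ≤ PySem.Chars.count.go sub fuel l acc := by
  intro fuel
  induction fuel with
  | zero => intro l acc; rw [PySem.Chars.count.go.eq_def]
  | succ n ih =>
    intro l acc
    rw [PySem.Chars.count.go.eq_def]
    cases l with
    | nil => simp
    | cons h t =>
      simp only
      split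
      · exact le_trans (Nat.le_succ acc) (ih _ _)
      · exact ih _ _

theorem countGo_pos_iff (sub : List Char) (hsub : sub ≠ []) :
    ∀ (fuel : Nat) (l : List Char) (acc : Nat), l.length ≤ fuel →
    (acc < PySem.Chars.count.go sub fuel l acc ↔ sub <:+: l) := by
  intro fuel
  induction fuel with
  | zero =>
    intro l acc hl
    have : l = [] := List.length_eq_zero_iff.mp (Nat.le_zero.mp hl)
    subst this
    rw [PySem.Chars.count.go.eq_def]
    simp [List.infix_iff_prefix_suffix]
    intro h; exact absurd (List.prefix_nil.mp (h.symm ▸ List.prefix_rfl)) hsub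
  | succ n ih =>
    intro l acc hl
    rw [PySem.Chars.count.go.eq_def]
    cases l with
    | nil =>
      simp [List.infix_nil, hsub]
    | cons h t =>
      simp only
      split
      · rename_i hpre
        constructor
        · intro _
          exact ((List.IsPrefix.isInfix (List.isPrefixOf_iff_prefix.mp hpre)))
        · intro _
          calc acc < acc + 1 := Nat.lt_succ_self acc
            _ ≤ _ := countGo_le sub n _ _
      · rename_i hpre
        have hnp : ¬ sub <+: (h :: t) := fun hp => hpre (List.isPrefixOf_iff_prefix.mpr hp)
        rw [ih t acc (by simpa using Nat.le_of_succ_le_succ (by simpa using hl))]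
        rw [List.infix_cons_iff]
        tauto

-- count s sub ≥ 1 iff sub is a substring (sub nonempty)
theorem count_pos_iff (s sub : List Char) (hsub : sub ≠ []) :
    (1 ≤ PySem.Chars.count s sub ↔ sub <:+: s) := by
  unfold PySem.Chars.count
  rw [if_neg (by simp [List.isEmpty_iff, hsub])]
  exact countGo_pos_iff sub hsub s.length s 0 (le_refl _)

-- a length-3 substring is exactly a window slice at some index of range(len-2)
theorem infix_iff_window (s m : List Char) (hm : m.length = 3) :
    (m <:+: s ↔ ∃ i ∈ PySem.List.pyRange 0 ((s.length : Int) - 2) 1,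
        PySem.List.slice s (some i) (some (i + 3)) = m) := by
  constructor
  · intro hinf
    obtain ⟨j, hle, hpre⟩ : ∃ j, j ≤ s.length ∧ m <+: s.drop j := by
      obtain ⟨pre, suf, hps⟩ := hinf
      exact ⟨pre.length, by subst hps; simp, by subst hps; simp⟩
    have hjlen : j + 3 ≤ s.length := by
      have := hpre.length_le
      simp [hm] at this
      omega
    refine ⟨(j : Int), ?_, ?_⟩
    · rw [PySem.List.mem_pyRange_one]
      constructor
      · positivity
      · omega
    · have h3 : ((j : Int) + 3) = ((j + 3 : Nat) : Int) := by omega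
      rw [h3, PySem.List.slice_natCast]
      have h4 : j + 3 - j = 3 := by omega
      rw [h4]
      have := List.prefix_iff_eq_take.mp hpre
      rw [← hm]; exact this.symm
  · rintro ⟨i, hi, hsl⟩
    rw [PySem.List.mem_pyRange_one] at hi
    obtain ⟨h0, h2⟩ := hi
    obtain ⟨j, rfl⟩ : ∃ j : Nat, i = (j : Int) := ⟨i.toNat, (Int.toNat_of_nonneg h0).symm⟩
    have h3 : ((j : Int) + 3) = ((j + 3 : Nat) : Int) := by push_cast; ring
    rw [h3, PySem.List.slice_natCast] at hsl
    have : List.take (j + 3 - j) (List.drop j s) <:+: s :=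
      ((List.take_prefix _ _).isInfix).trans (List.drop_suffix _ _).isInfix
    exact hsl ▸ this

-- membership in the window-collecting fold
theorem mem_fold_windows (w : Int → String) (l : List Int) (fs : PySem.Set String)
    (hnd : fs.Nodup) (x : String) :
    (x ∈ l.foldl (fun fs i => if VALID_SET.contains (w i) then PySem.Set.add fs (w i) else fs) fs
      ↔ x ∈ fs ∨ ∃ i ∈ l, w i = x ∧ VALID_SET.contains (w i) = true) ∧
    (l.foldl (fun fs i => if VALID_SET.contains (w i) then PySem.Set.add fs (w i) else fs) fs).Nodup := by
  induction l generalizing fs with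
  | nil => simpa using hnd
  | cons a t ih =>
    simp only [List.foldl_cons]
    by_cases hc : VALID_SET.contains (w a) = true
    · rw [if_pos hc]
      obtain ⟨h1, h2⟩ := ih (PySem.Set.add fs (w a)) (PySem.Set.nodup_add fs (w a) hnd)
      refine ⟨?_, h2⟩
      rw [h1, PySem.Set.mem_add]
      constructor
      · rintro ((h | h) | ⟨i, hi, hwi, hci⟩)
        · exact Or.inl h
        · exact Or.inr ⟨a, by simp, h.symm, hc⟩
        · exact Or.inr ⟨i, by simp [hi], hwi, hci⟩
      · rintro (h | ⟨i, hi, hwi, hci⟩)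
        · exact Or.inl (Or.inl h)
        · rcases List.mem_cons.mp hi with rfl | hit
          · exact Or.inl (Or.inr hwi.symm)
          · exact Or.inr ⟨i, hit, hwi, hci⟩
    · rw [if_neg hc]
      obtain ⟨h1, h2⟩ := ih fs hnd
      refine ⟨?_, h2⟩
      rw [h1]
      constructor
      · rintro (h | ⟨i, hi, hwi, hci⟩)
        · exact Or.inl h
        · exact Or.inr ⟨i, by simp [hi], hwi, hci⟩
      · rintro (h | ⟨i, hi, hwi, hci⟩)
        · exact Or.inl h
        · rcases List.mem_cons.mp hi with rfl | hit
          · exact absurd hci hc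
          · exact Or.inr ⟨i, hit, hwi, hci⟩


-- for a 3-char code, "count >= 1" is "some window equals the code"
theorem code_mem_iff (cadena x : String) (hx3 : x.toList.length = 3) :
    (1 ≤ PySem.Str.count cadena x ↔
      ∃ i ∈ PySem.List.pyRange 0 (PySem.Str.len cadena - 2) 1,
        PySem.Str.slice cadena (some i) (some (i + 3)) = x) := by
  have hne : x.toList ≠ [] := by intro h; rw [h] at hx3; simp at hx3
  rw [PySem.Str.count_eq, count_pos_iff _ _ hne, infix_iff_window _ _ hx3]
  simp only [PySem.Str.len_eq]
  refine exists_congr fun i => and_congr Iff.rfl ?_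
  rw [← String.toList_inj, PySem.Str.toList_slice, PySem.Chars.slice_eq_listSlice]

theorem main_eq (cadena : String) : detectar_moneda cadena = detectar_moneda_alt cadena := by
  unfold detectar_moneda detectar_moneda_alt
  dsimp only
  set w : Int → String := fun i => PySem.Str.slice cadena (some i) (some (i + 3)) with hw
  set rng := PySem.List.pyRange 0 (PySem.Str.len cadena - 2) 1 with hrng
  set E := MONEDAS_VALIDAS.filter (fun m => decide (1 ≤ PySem.Str.count cadena m)) with hE
  set F := rng.foldl (fun fs i => if VALID_SET.contains (w i) then PySem.Set.add fs (w i) else fs)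
      PySem.Set.empty with hF
  have hfold := fun x => mem_fold_windows w rng PySem.Set.empty List.nodup_nil x
  have hlen3 : ∀ x ∈ MONEDAS_VALIDAS, x.toList.length = 3 := by decide
  have hndF : F.Nodup := (hfold "").2
  have hmem : ∀ x, x ∈ F ↔ x ∈ E := by
    intro x
    rw [hE, List.mem_filter, hF]
    rw [(hfold x).1]
    simp only [PySem.Set.empty, List.not_mem_nil, false_or, decide_eq_true_eq]
    constructor
    · rintro ⟨i, hi, rfl, hc⟩
      have hxm : w i ∈ MONEDAS_VALIDAS := by
        have := (PySem.Set.contains_iff VALID_SET (w i)).mp hc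
        simpa [VALID_SET, PySem.Set.mem_ofList, MONEDAS_VALIDAS] using this
      refine ⟨hxm, ?_⟩
      have h3 : (w i).toList.length = 3 := hlen3 _ hxm
      exact (code_mem_iff cadena (w i) h3).mpr ⟨i, hi, rfl⟩
    · rintro ⟨hxm, hcnt⟩
      have h3 : x.toList.length = 3 := hlen3 _ hxm
      obtain ⟨i, hi, hwi⟩ := (code_mem_iff cadena x h3).mp hcnt
      refine ⟨i, hi, hwi, ?_⟩
      rw [show w i = x from hwi]
      exact (PySem.Set.contains_iff VALID_SET x).mpr
        (by simpa [VALID_SET, PySem.Set.mem_ofList, MONEDAS_VALIDAS] using hxm)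
  have hndE : E.Nodup := List.Nodup.filter _ (by decide)
  have hperm : F.Perm E := (List.perm_ext_iff_of_nodup hndF hndE).mpr hmem
  have hlen : F.length = E.length := hperm.length_eq
  simp only [PySem.Set.len]
  by_cases h1 : E.length = 1
  · obtain ⟨a, hEa⟩ := List.length_eq_one_iff.mp h1
    have hF1 : F.length = 1 := by omega
    obtain ⟨b, hFb⟩ := List.length_eq_one_iff.mp hF1
    have hba : b = a := by
      have hb : b ∈ E := (hmem b).mp (by simp [hFb])
      simpa [hEa] using hb
    subst hba
    rw [if_pos h1, if_pos (by rw [hF1]; norm_num)]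
    simp [hEa, hFb, PySem.List.pyGetD, PySem.List.pyGet?, PySem.List.pyIdx?]
  · by_cases h0 : E.length = 0
    · have hF0 : F.length = 0 := by omega
      rw [if_neg h1, if_pos h0, if_neg (by omega), if_pos (by rw [hF0]; norm_num)]
    · rw [if_neg h1, if_neg h0, if_neg (by omega), if_neg (by omega)]

-- ===== VERDICT (by name: the statement is the Claim_ definition above) =====
theorem detectar_moneda_spec : Claim_equal_detectar_moneda := by
  intro cadena _
  exact main_eq cadena
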